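-- pv_equiv track=rewrite | github.com/hzee97/Programmers | 알고리즘 고득점Kit/완전탐색/모의고사.py | solution
-- ===== SOURCE A (Python) =====
-- def solution(answers):
--     answer = []
--
--     one=[1,2,3,4,5]
--     two=[2,1,2,3,2,4,2,5]
--     three=[3,3,1,1,2,2,4,4,5,5]
--
--     result=[0,0,0]
--     for idx,val in enumerate(answers):
--         if one[idx%len(one)]==val:
--             result[0]+=1
--         if two[idx%len(two)]==val:
--             result[1]+=1
--         if three[idx%len(three)]==val:
--             result[2]+=1
--
--     for i in range(len(result)):
--         if result[i]==max(result):
--             answer.append(i+1)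
--
--     return answer
-- ===== SOURCE B (Python) =====
-- def solution(answers):
--     # One pass builds a histogram keyed by (index mod 40, answer); the three scores
--     # are then read off the histogram over one combined 40-long cycle, no rescan.
--     buckets = {}
--     for i, v in enumerate(answers):
--         key = (i % 40, v)
--         buckets[key] = buckets.get(key, 0) + 1
--     patterns = [[1, 2, 3, 4, 5],
--                 [2, 1, 2, 3, 2, 4, 2, 5],
--                 [3, 3, 1, 1, 2, 2, 4, 4, 5, 5]]
--     scores = [sum(buckets.get((r, p[r % len(p)]), 0) for r in range(40))
--               for p in patterns]
--     best = max(scores)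
--     return [i + 1 for i, s in enumerate(scores) if s == best]
-- ===== Notes on version B (the rewrite author's own statement) =====
-- stated objective: alternative
-- what changed: Instead of comparing each answer against all three patterns with three fused counters, B makes one pass building a histogram keyed by (index mod 40, answer) and then computes each pattern's score purely from the histogram over the combined 40-slot cycle (lcm of 5,8,10), without rescanning the answers.
import Mathlib
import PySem

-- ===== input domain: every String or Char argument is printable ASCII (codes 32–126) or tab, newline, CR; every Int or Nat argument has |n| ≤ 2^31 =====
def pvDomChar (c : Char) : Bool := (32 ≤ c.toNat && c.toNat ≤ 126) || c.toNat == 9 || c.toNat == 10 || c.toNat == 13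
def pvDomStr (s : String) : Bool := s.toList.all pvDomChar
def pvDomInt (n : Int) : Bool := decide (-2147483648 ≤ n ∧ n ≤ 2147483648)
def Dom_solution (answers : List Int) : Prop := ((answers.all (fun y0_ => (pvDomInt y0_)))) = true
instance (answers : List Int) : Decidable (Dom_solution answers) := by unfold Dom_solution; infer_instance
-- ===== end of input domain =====

-- B builds a histogram keyed by (index mod 40, answer) in one pass and reads the three
-- pattern scores off the histogram over the combined 40-slot cycle, instead of A's
-- fused loop with three counters; objective: alternative algorithm, same cost.


-- ===== PORT A =====
def solution (answers : List Int) : List Int :=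
  let one : List Int := [1, 2, 3, 4, 5]
  let two : List Int := [2, 1, 2, 3, 2, 4, 2, 5]
  let three : List Int := [3, 3, 1, 1, 2, 2, 4, 4, 5, 5]
  let result : Int × Int × Int :=
    (PySem.List.enumerate answers 0).foldl (fun r p =>
      let r0 := if PySem.List.pyGetD one (PySem.Int.mod p.1 (one.length : Int)) 0 == p.2 then r.1 + 1 else r.1
      let r1 := if PySem.List.pyGetD two (PySem.Int.mod p.1 (two.length : Int)) 0 == p.2 then r.2.1 + 1 else r.2.1
      let r2 := if PySem.List.pyGetD three (PySem.Int.mod p.1 (three.length : Int)) 0 == p.2 then r.2.2 + 1 else r.2.2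
      (r0, r1, r2)) (0, 0, 0)
  let resL : List Int := [result.1, result.2.1, result.2.2]
  (PySem.List.pyRange 0 ((resL.length : Int)) 1).foldl (fun acc i =>
    if PySem.List.pyGetD resL i 0 == (PySem.List.max? resL (fun x => x)).getD 0
    then acc ++ [i + 1] else acc) []

-- ===== PORT B =====
def solution_alt (answers : List Int) : List Int :=
  let buckets : PySem.Dict (Int × Int) Int :=
    (PySem.List.enumerate answers 0).foldl (fun d p =>
      let key : Int × Int := (PySem.Int.mod p.1 40, p.2)
      d.insert key (d.getD key 0 + 1)) PySem.Dict.empty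
  let patterns : List (List Int) :=
    [[1, 2, 3, 4, 5], [2, 1, 2, 3, 2, 4, 2, 5], [3, 3, 1, 1, 2, 2, 4, 4, 5, 5]]
  let scores := patterns.map (fun p =>
    ((PySem.List.pyRange 0 40 1).map (fun r =>
      buckets.getD (r, PySem.List.pyGetD p (PySem.Int.mod r (p.length : Int)) 0) 0)).sum)
  let best := (PySem.List.max? scores (fun x => x)).getD 0
  (PySem.List.enumerate scores 0).foldl (fun acc q =>
    if q.2 == best then acc ++ [q.1 + 1] else acc) []

-- ===== PRECONDITION & SPEC =====
def Spec_solution (answers : List Int) (out : List Int) : Prop := out = solution_alt answers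
instance (answers : List Int) (out : List Int) : Decidable (Spec_solution answers out) := by unfold Spec_solution; infer_instance

-- ===== CLAIM (what is proved, stated in full; the proofs are below) =====
def Claim_equal_solution : Prop := ∀ (answers : List Int), Dom_solution answers → Spec_solution answers (solution answers)

-- ===== LEMMAS AND PROOFS =====

-- reference count: how often pattern `pat` matches `answers` starting at index s
def pvCnt (pat : List Int) : List Int → Int → Int
  | [], _ => 0
  | v :: vs, s =>
      (if PySem.List.pyGetD pat (PySem.Int.mod s (pat.length : Int)) 0 == v then 1 else 0) + pvCnt pat vs (s + 1)

theorem fusedA (answers : List Int) (s r0 r1 r2 : Int) :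
    (PySem.List.enumerate answers s).foldl (fun (r : Int × Int × Int) p =>
      let a0 := if PySem.List.pyGetD ([1, 2, 3, 4, 5] : List Int) (PySem.Int.mod p.1 (([1, 2, 3, 4, 5] : List Int).length : Int)) 0 == p.2 then r.1 + 1 else r.1
      let a1 := if PySem.List.pyGetD ([2, 1, 2, 3, 2, 4, 2, 5] : List Int) (PySem.Int.mod p.1 (([2, 1, 2, 3, 2, 4, 2, 5] : List Int).length : Int)) 0 == p.2 then r.2.1 + 1 else r.2.1
      let a2 := if PySem.List.pyGetD ([3, 3, 1, 1, 2, 2, 4, 4, 5, 5] : List Int) (PySem.Int.mod p.1 (([3, 3, 1, 1, 2, 2, 4, 4, 5, 5] : List Int).length : Int)) 0 == p.2 then r.2.2 + 1 else r.2.2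
      (a0, a1, a2)) (r0, r1, r2)
    = (r0 + pvCnt [1, 2, 3, 4, 5] answers s,
       r1 + pvCnt [2, 1, 2, 3, 2, 4, 2, 5] answers s,
       r2 + pvCnt [3, 3, 1, 1, 2, 2, 4, 4, 5, 5] answers s) := by
  induction answers generalizing s r0 r1 r2 with
  | nil => simp [pvCnt]
  | cons v vs ih =>
      simp only [PySem.List.enumerate_cons, List.foldl_cons, pvCnt, ih]
      refine Prod.ext ?_ (Prod.ext ?_ ?_) <;> simp <;> split <;> omega

-- the histogram lookup is a count over the keyed enumeration
theorem bucket_getD (answers : List Int) (s : Int) (d : PySem.Dict (Int × Int) Int) (k : Int × Int) :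
    ((PySem.List.enumerate answers s).foldl (fun d p =>
      let key : Int × Int := (PySem.Int.mod p.1 40, p.2)
      d.insert key (d.getD key 0 + 1)) d).getD k 0
    = d.getD k 0 + (((PySem.List.enumerate answers s).map (fun p => (PySem.Int.mod p.1 40, p.2))).count k : Int) := by
  induction answers generalizing s d with
  | nil => simp
  | cons v vs ih =>
      simp only [PySem.List.enumerate_cons, List.foldl_cons, List.map_cons]
      rw [ih, PySem.Dict.getD_insert, List.count_cons]
      by_cases h : k = (PySem.Int.mod s 40, v)
      · rw [if_pos h, if_pos (beq_iff_eq.mpr h.symm)]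
        rw [h]; push_cast; ring
      · rw [if_neg h, if_neg (by simp only [beq_iff_eq]; exact fun hh => h hh.symm)]
        push_cast; ring

-- on a nodup list containing a, counting hits of '(a, v) = (r, g r)' is 1 or 0 as g a = v
theorem countP_point (l : List Int) (hnd : l.Nodup) (a : Int) (ha : a ∈ l) (g : Int → Int) (v : Int) :
    l.countP (fun r => decide ((a, v) = (r, g r))) = if g a = v then 1 else 0 := by
  by_cases h : g a = v
  · rw [if_pos h]
    have hfun : (fun r => decide ((a, v) = (r, g r))) = (fun r => r == a) := by
      funext r
      by_cases hr : r = a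
      · subst hr; simp [h.symm]
      · simp [Ne.symm hr, hr]
    rw [hfun, ← List.count_eq_countP, List.count_eq_one_of_mem hnd ha]
  · rw [if_neg h, List.countP_eq_zero.mpr]
    intro x _
    simp only [Prod.mk.injEq, decide_eq_true_eq, not_and]
    rintro rfl hv; exact h hv.symm

-- the per-pattern histogram sum equals the direct count, for any pattern whose length divides 40
theorem score_eq_cnt (p : List Int) (hdvd : ((p.length : Int)) ∣ 40) (hpos : 0 < (p.length : Int))
    (answers : List Int) (s : Int) :
    ((PySem.List.pyRange 0 40 1).map (fun r =>
      (((PySem.List.enumerate answers s).map (fun q => (PySem.Int.mod q.1 40, q.2))).count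
        (r, PySem.List.pyGetD p (PySem.Int.mod r (p.length : Int)) 0) : Int))).sum
    = pvCnt p answers s := by
  induction answers generalizing s with
  | nil => simp [pvCnt]
  | cons v vs ih =>
      simp only [PySem.List.enumerate_cons, List.map_cons, pvCnt]
      have key40 : PySem.Int.mod (PySem.Int.mod s 40) (p.length : Int)
          = PySem.Int.mod s (p.length : Int) := by
        rw [PySem.Int.mod_eq_emod_of_pos (show (0:Int) < 40 by norm_num),
            PySem.Int.mod_eq_emod_of_pos hpos, PySem.Int.mod_eq_emod_of_pos hpos,
            Int.emod_emod_of_dvd _ hdvd]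
      have hsplit : ((PySem.List.pyRange 0 40 1).map (fun r =>
              (((PySem.Int.mod s 40, v) :: (PySem.List.enumerate vs (s+1)).map (fun q => (PySem.Int.mod q.1 40, q.2))).count
                (r, PySem.List.pyGetD p (PySem.Int.mod r (p.length : Int)) 0) : Int))).sum
          = ((PySem.List.pyRange 0 40 1).map (fun r =>
              (((PySem.List.enumerate vs (s+1)).map (fun q => (PySem.Int.mod q.1 40, q.2))).count
                (r, PySem.List.pyGetD p (PySem.Int.mod r (p.length : Int)) 0) : Int))).sum
            + ((PySem.List.pyRange 0 40 1).map (fun r =>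
              (if (decide ((PySem.Int.mod s 40, v) = (r, PySem.List.pyGetD p (PySem.Int.mod r (p.length : Int)) 0))) = true then (1:Int) else 0))).sum := by
        rw [← PySem.List.sum_map_add_int]
        apply congrArg
        apply List.map_congr_left
        intro r _
        rw [List.count_cons]
        simp
      rw [hsplit, ih, PySem.List.sum_map_ite_one_zero,
          countP_point (PySem.List.pyRange 0 40 1) (PySem.List.nodup_pyRange_one 0 40)
            (PySem.Int.mod s 40)
            (by rw [PySem.List.mem_pyRange_one]
                exact ⟨PySem.Int.mod_nonneg s (by norm_num), PySem.Int.mod_lt s (by norm_num)⟩)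
            (fun r => PySem.List.pyGetD p (PySem.Int.mod r (p.length : Int)) 0) v]
      rw [key40]
      by_cases h : PySem.List.pyGetD p (PySem.Int.mod s (p.length : Int)) 0 = v
      · simp only [beq_iff_eq, if_pos h]; push_cast; ring
      · simp only [beq_iff_eq, if_neg h]; push_cast; ring

-- ===== VERDICT (by name: the statement is the Claim_ definition above) =====
theorem solution_spec : Claim_equal_solution := by
  intro answers _
  unfold Spec_solution solution solution_alt
  simp only [fusedA, zero_add, List.map_cons, List.map_nil, bucket_getD,
    PySem.Dict.getD_empty]
  rw [score_eq_cnt [1, 2, 3, 4, 5] (by norm_num) (by norm_num) answers 0,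
      score_eq_cnt [2, 1, 2, 3, 2, 4, 2, 5] (by norm_num) (by norm_num) answers 0,
      score_eq_cnt [3, 3, 1, 1, 2, 2, 4, 4, 5, 5] (by norm_num) (by norm_num) answers 0]
  simp only [List.length_cons, List.length_nil]
  rw [show PySem.List.pyRange 0 (((0 + 1 + 1 + 1 : Nat)) : Int) 1 = [0, 1, 2] from by decide]
  norm_num [PySem.List.enumerate_cons,
    PySem.List.pyGetD, PySem.List.pyGet?, PySem.List.pyIdx?,
    show Int.toNat 0 = 0 from rfl, show Int.toNat 1 = 1 from rfl, show Int.toNat 2 = 2 from rfl]
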